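-- pv_equiv track=rewrite | github.com/Alexia-Garces/candidate-compass | utils.py | detect_qualification_level
-- ===== SOURCE A (Python) =====
-- from typing import Dict, List, Tuple, Any, Optional
--
-- def detect_qualification_level(years_experience: int, level_thresholds: List[int]) -> int:
--     """
--     Determine which job level a candidate qualifies for based on experience.
--
--     Args:
--         years_experience: Years of relevant experience
--         level_thresholds: List of minimum years required for each level (e.g., [0, 1, 2, 3, 4] for I-V)
--
--     Returns:
--         Index of highest qualifying level (0-based)
--
--     Example:
--         detect_qualification_level(2, [0, 1, 2, 3, 4]) -> 2 (qualifies for level III)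
--     """
--     qualified_level = 0
--     for i, threshold in enumerate(level_thresholds):
--         if years_experience >= threshold:
--             qualified_level = i
--         else:
--             break
--     return qualified_level
-- ===== SOURCE B (Python) =====
-- from itertools import accumulate
-- from bisect import bisect_right
--
-- def detect_qualification_level(years_experience: int, level_thresholds):
--     # A candidate qualifies for level i iff years_experience >= every threshold
--     # in the prefix [0..i], i.e. iff years_experience >= max(level_thresholds[:i+1]).
--     # The running maxima are nondecreasing by construction (even when the input is
--     # unsorted), so the number of qualifying prefixes can be found by binary search.
--     prefix_max = list(accumulate(level_thresholds, max))
--     return max(bisect_right(prefix_max, years_experience) - 1, 0)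
-- ===== Notes on version B (the rewrite author's own statement) =====
-- stated objective: alternative
-- what changed: Replaces A's linear break-on-failure loop by a prefix-maximum transform (accumulate with max) followed by binary search (bisect_right) on the resulting nondecreasing list, with the closed form max(n-1,0).
import Mathlib
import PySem

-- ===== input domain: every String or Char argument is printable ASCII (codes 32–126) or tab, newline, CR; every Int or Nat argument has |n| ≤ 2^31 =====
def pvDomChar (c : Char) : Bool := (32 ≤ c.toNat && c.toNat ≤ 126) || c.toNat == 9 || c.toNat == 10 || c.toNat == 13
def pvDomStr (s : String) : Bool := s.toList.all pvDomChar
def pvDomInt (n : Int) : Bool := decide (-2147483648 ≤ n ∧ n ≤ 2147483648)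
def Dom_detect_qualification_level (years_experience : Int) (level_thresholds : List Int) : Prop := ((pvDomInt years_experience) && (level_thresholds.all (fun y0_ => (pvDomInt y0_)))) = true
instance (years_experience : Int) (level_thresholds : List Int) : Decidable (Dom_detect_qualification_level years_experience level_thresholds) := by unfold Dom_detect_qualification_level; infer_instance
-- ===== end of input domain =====

-- B replaces A's break-on-failure loop by a prefix-maximum transform plus bisect_right on the resulting nondecreasing list; objective: alternative algorithm.


-- ===== PORT A =====
-- loop over enumerate(level_thresholds): on success record i, on failure break
def detect_qualification_level_go (years_experience : Int) (i : Int) (qualified_level : Int) : List Int → Int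
  | [] => qualified_level
  | threshold :: rest =>
      if years_experience ≥ threshold then
        detect_qualification_level_go years_experience (i + 1) i rest
      else
        qualified_level

def detect_qualification_level (years_experience : Int) (level_thresholds : List Int) : Int :=
  detect_qualification_level_go years_experience 0 0 level_thresholds

-- ===== PORT B =====
-- itertools.accumulate(level_thresholds, max): carry the running maximum down the list
def pmGo (acc : Int) : List Int → List Int
  | [] => []
  | x :: xs => (max acc x) :: pmGo (max acc x) xs

def prefixMaxes : List Int → List Int
  | [] => []
  | x :: xs => x :: pmGo x xs

def detect_qualification_level_alt (years_experience : Int) (level_thresholds : List Int) : Int :=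
  let prefix_max := prefixMaxes level_thresholds
  -- bisect.bisect_right ported as the PySem primitive
  max ((PySem.List.bisectRight prefix_max years_experience : Int) - 1) 0

-- ===== PRECONDITION & SPEC =====
def Spec_detect_qualification_level (years_experience : Int) (level_thresholds : List Int) (out : Int) : Prop := out = detect_qualification_level_alt years_experience level_thresholds
instance (years_experience : Int) (level_thresholds : List Int) (out : Int) : Decidable (Spec_detect_qualification_level years_experience level_thresholds out) := by unfold Spec_detect_qualification_level; infer_instance

-- ===== CLAIM (what is proved, stated in full; the proofs are below) =====
def Claim_equal_detect_qualification_level : Prop := ∀ (years_experience : Int) (level_thresholds : List Int), Dom_detect_qualification_level years_experience level_thresholds → Spec_detect_qualification_level years_experience level_thresholds (detect_qualification_level years_experience level_thresholds)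

-- ===== LEMMAS AND PROOFS =====

-- A's loop returns the last index of the satisfied prefix (0 if the prefix is empty)
theorem detect_qualification_level_go_eq (y : Int) (xs : List Int) : ∀ (i q : Int),
    detect_qualification_level_go y i q xs =
      if (xs.takeWhile (fun t => y ≥ t)).length = 0 then q
      else i + ((xs.takeWhile (fun t => y ≥ t)).length : Int) - 1 := by
  induction xs with
  | nil => intro i q; simp [detect_qualification_level_go]
  | cons t rest ih =>
      intro i q
      by_cases h : y ≥ t
      · simp only [detect_qualification_level_go, List.takeWhile, ge_iff_le, h, if_pos, decide_true,
          List.length_cons]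
        rw [ih]
        split_ifs with h0 <;> simp only [ge_iff_le] at * <;> push_cast <;> omega
      · simp [detect_qualification_level_go, List.takeWhile, h]

theorem length_pmGo (acc : Int) (xs : List Int) : (pmGo acc xs).length = xs.length := by
  induction xs generalizing acc with
  | nil => simp [pmGo]
  | cons x xs ih => simp [pmGo, ih]

theorem le_of_mem_pmGo (acc z : Int) (xs : List Int) (hz : z ∈ pmGo acc xs) : acc ≤ z := by
  induction xs generalizing acc with
  | nil => simp [pmGo] at hz
  | cons x xs ih =>
      simp only [pmGo, List.mem_cons] at hz
      rcases hz with h | h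
      · omega
      · have := ih (max acc x) h; omega

theorem pairwise_pmGo (acc : Int) (xs : List Int) :
    (pmGo acc xs).Pairwise (· ≤ ·) := by
  induction xs generalizing acc with
  | nil => simp [pmGo]
  | cons x xs ih =>
      simp only [pmGo, List.pairwise_cons]
      exact ⟨fun z hz => le_of_mem_pmGo _ _ _ hz, ih _⟩

theorem pairwise_prefixMaxes (xs : List Int) : (prefixMaxes xs).Pairwise (· ≤ ·) := by
  cases xs with
  | nil => simp [prefixMaxes]
  | cons x xs =>
      simp only [prefixMaxes, List.pairwise_cons]
      exact ⟨fun z hz => le_of_mem_pmGo _ _ _ hz, pairwise_pmGo _ _⟩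

-- running maximum ≤ y at position i ↔ position i is inside the satisfied prefix
theorem pmGo_char (y : Int) (xs : List Int) : ∀ (acc : Int), acc ≤ y → ∀ (i : Nat)
    (h1 : i < (pmGo acc xs).length),
    ((pmGo acc xs)[i] ≤ y ↔ i < (xs.takeWhile (fun t => y ≥ t)).length) := by
  induction xs with
  | nil => intro acc _ i h1; simp [pmGo] at h1
  | cons x xs ih =>
      intro acc hacc i h1
      by_cases hx : x ≤ y
      · have hM : max acc x ≤ y := by omega
        have htw : ((x :: xs).takeWhile (fun t => y ≥ t)).length
            = (xs.takeWhile (fun t => y ≥ t)).length + 1 := by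
          simp [hx]
        cases i with
        | zero =>
            simp only [pmGo, List.getElem_cons_zero, htw]
            constructor
            · intro _; omega
            · intro _; omega
        | succ j =>
            simp only [pmGo, List.getElem_cons_succ, htw]
            rw [ih (max acc x) hM j (by simpa [pmGo, length_pmGo] using h1)]
            omega
      · have htw : ((x :: xs).takeWhile (fun t => y ≥ t)).length = 0 := by
          simp [hx]
        rw [htw]
        simp only [Nat.not_lt_zero, iff_false, not_le]
        cases i with
        | zero =>
            simp only [pmGo, List.getElem_cons_zero]
            omega
        | succ j =>
            have h1' : j < (pmGo (max acc x) xs).length := by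
              simpa [pmGo] using h1
            have hmem : (pmGo (max acc x) xs)[j] ∈ pmGo (max acc x) xs :=
              List.getElem_mem h1'
            have hge := le_of_mem_pmGo (max acc x) _ _ hmem
            simp only [pmGo, List.getElem_cons_succ]
            omega

theorem prefixMaxes_char (y : Int) (xs : List Int) (i : Nat)
    (h1 : i < (prefixMaxes xs).length) :
    ((prefixMaxes xs)[i] ≤ y ↔ i < (xs.takeWhile (fun t => y ≥ t)).length) := by
  cases xs with
  | nil => simp [prefixMaxes] at h1
  | cons x xs =>
      by_cases hx : x ≤ y
      · have htw : ((x :: xs).takeWhile (fun t => y ≥ t)).length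
            = (xs.takeWhile (fun t => y ≥ t)).length + 1 := by
          simp [hx]
        cases i with
        | zero =>
            simp only [prefixMaxes, List.getElem_cons_zero, htw]
            constructor
            · intro _; omega
            · intro _; exact hx
        | succ j =>
            simp only [prefixMaxes, List.getElem_cons_succ, htw]
            rw [pmGo_char y xs x hx j (by simpa [prefixMaxes, length_pmGo] using h1)]
            omega
      · have htw : ((x :: xs).takeWhile (fun t => y ≥ t)).length = 0 := by
          simp [hx]
        rw [htw]
        simp only [Nat.not_lt_zero, iff_false, not_le]
        cases i with
        | zero =>
            simp only [prefixMaxes, List.getElem_cons_zero]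
            omega
        | succ j =>
            have h1' : j < (pmGo x xs).length := by
              simpa [prefixMaxes] using h1
            have hmem : (pmGo x xs)[j] ∈ pmGo x xs := List.getElem_mem h1'
            have hge := le_of_mem_pmGo x _ _ hmem
            simp only [prefixMaxes, List.getElem_cons_succ]
            omega

theorem length_prefixMaxes (xs : List Int) : (prefixMaxes xs).length = xs.length := by
  cases xs with
  | nil => rfl
  | cons x xs => simp [prefixMaxes, length_pmGo]

theorem bisect_prefixMaxes (y : Int) (xs : List Int) :
    PySem.List.bisectRight (prefixMaxes xs) y = (xs.takeWhile (fun t => y ≥ t)).length := by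
  obtain ⟨hle, hlt, hgt⟩ := PySem.List.bisectRight_spec (prefixMaxes xs) y (pairwise_prefixMaxes xs)
  set k := PySem.List.bisectRight (prefixMaxes xs) y with hk
  set t := (xs.takeWhile (fun t => y ≥ t)).length with htd
  have htlen : t ≤ xs.length := (List.takeWhile_sublist _).length_le
  have hplen : (prefixMaxes xs).length = xs.length := length_prefixMaxes xs
  rcases Nat.lt_trichotomy k t with h | h | h
  · -- k < t: pm[k] ≤ y by the characterization, but the bisect spec says y < pm[k]
    have hkl : k < (prefixMaxes xs).length := by omega
    have hc := (prefixMaxes_char y xs k hkl).mpr (by omega)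
    have hs := hgt k hkl (le_refl k)
    omega
  · exact h
  · -- t < k: the bisect spec says pm[t] ≤ y, the characterization says not
    have htl : t < (prefixMaxes xs).length := by omega
    have hs := hlt t htl h
    have hc := (prefixMaxes_char y xs t htl).mp hs
    omega

-- ===== VERDICT (by name: the statement is the Claim_ definition above) =====
theorem detect_qualification_level_spec : Claim_equal_detect_qualification_level := by
  intro y xs _
  unfold Spec_detect_qualification_level detect_qualification_level detect_qualification_level_alt
  rw [detect_qualification_level_go_eq]
  show _ = max (((PySem.List.bisectRight (prefixMaxes xs) y : Nat) : Int) - 1) 0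
  rw [bisect_prefixMaxes]
  split_ifs with h0 <;> push_cast [h0] <;> omega
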